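-- pv_equiv track=rewrite | github.com/xueyinglyu/AVID | Summary_BWA.py | softclip_one
-- ===== SOURCE A (Python) =====
-- def softclip_one(cigar_info):
-- 	soft_clip_start=0
-- 	soft_clip_end=0
-- 	match_base=0
-- 	count=0
-- 	mark="S"
-- 	for k in cigar_info:
-- 		count=count+1
-- 		if k[1]=='M' and count>1:
-- 			match_base=int(k[0])
-- 		if k[1]=="M" and count==1:
-- 			soft_clip_start=soft_clip_start+int(k[0])
-- 			soft_clip_end=soft_clip_end+int(k[0])
-- 			match_base=int(k[0])
-- 			mark="M"
-- 		if k[1]=="S":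
-- 			soft_clip_end=soft_clip_end+int(k[0])
-- 		if k[1]=="I":
-- 			soft_clip_start=soft_clip_start+int(k[0])
-- 			soft_clip_end=soft_clip_end+int(k[0])
-- 	return (soft_clip_start,soft_clip_end,match_base,mark)
-- ===== SOURCE B (Python) =====
-- def softclip_one(cigar_info):
--     ops = list(cigar_info)
--     first_is_m = bool(ops) and ops[0][1] == 'M'
--     first_len = int(ops[0][0]) if first_is_m else 0
--     i_sum = sum(int(l) for l, op in ops if op == 'I')
--     s_sum = sum(int(l) for l, op in ops if op == 'S')
--     m_lens = [int(l) for l, op in ops if op == 'M']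
--     match_base = m_lens[-1] if m_lens else 0
--     mark = 'M' if first_is_m else 'S'
--     return (first_len + i_sum, first_len + s_sum + i_sum, match_base, mark)
-- ===== Notes on version B (the rewrite author's own statement) =====
-- stated objective: simpler
-- what changed: Replaces A's single stateful accumulating loop with a count flag by independent aggregate passes: first-element test, comprehension sums of I and S lengths, and the last M length, combined by closed formulas.
import Mathlib
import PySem

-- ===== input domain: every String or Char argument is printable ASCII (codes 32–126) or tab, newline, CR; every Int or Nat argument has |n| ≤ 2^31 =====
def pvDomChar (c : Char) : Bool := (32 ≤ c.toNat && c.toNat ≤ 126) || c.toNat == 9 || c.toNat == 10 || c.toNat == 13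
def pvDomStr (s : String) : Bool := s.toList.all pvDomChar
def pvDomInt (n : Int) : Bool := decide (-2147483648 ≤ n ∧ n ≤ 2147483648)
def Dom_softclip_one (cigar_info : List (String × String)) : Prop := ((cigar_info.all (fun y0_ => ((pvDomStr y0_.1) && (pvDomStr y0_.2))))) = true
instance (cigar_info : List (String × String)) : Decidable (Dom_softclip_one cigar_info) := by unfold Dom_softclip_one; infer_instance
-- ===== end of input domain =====

-- B replaces A's single stateful loop (with a position counter) by independent
-- aggregate passes combined with closed formulas; same cost, simpler.
-- ===== PORT A =====
-- int(s) on a list-length string; Pre_ guarantees the parse succeeds wherever A calls int()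
def pvToI (s : String) : Int := (PySem.Int.ofStr? s).getD 0

-- the body of A's for-loop, one iteration (state = soft_clip_start, soft_clip_end, match_base, count, mark)
def pvStepA (st : Int × Int × Int × Int × String) (k : String × String) : Int × Int × Int × Int × String :=
  let scs := st.1; let sce := st.2.1; let mb := st.2.2.1
  let count := st.2.2.2.1 + 1; let mark := st.2.2.2.2
  let mb := if k.2 == "M" && decide (count > 1) then pvToI k.1 else mb
  let scs := if k.2 == "M" && count == 1 then scs + pvToI k.1 else scs
  let sce := if k.2 == "M" && count == 1 then sce + pvToI k.1 else sce
  let mb := if k.2 == "M" && count == 1 then pvToI k.1 else mb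
  let mark := if k.2 == "M" && count == 1 then "M" else mark
  let sce := if k.2 == "S" then sce + pvToI k.1 else sce
  let scs := if k.2 == "I" then scs + pvToI k.1 else scs
  let sce := if k.2 == "I" then sce + pvToI k.1 else sce
  (scs, sce, mb, count, mark)

def softclip_one (cigar_info : List (String × String)) : Int × Int × Int × String :=
  let st := cigar_info.foldl pvStepA (0, 0, 0, 0, "S")
  (st.1, st.2.1, st.2.2.1, st.2.2.2.2)

-- ===== PORT B =====
def softclip_one_alt (cigar_info : List (String × String)) : Int × Int × Int × String :=
  let first_is_m := cigar_info.head?.elim false (fun k => k.2 == "M")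
  let first_len : Int := if first_is_m then cigar_info.head?.elim 0 (fun k => pvToI k.1) else 0
  let i_sum := ((cigar_info.filter (fun k => k.2 == "I")).map (fun k => pvToI k.1)).sum
  let s_sum := ((cigar_info.filter (fun k => k.2 == "S")).map (fun k => pvToI k.1)).sum
  let m_lens := (cigar_info.filter (fun k => k.2 == "M")).map (fun k => pvToI k.1)
  let match_base := m_lens.getLast?.getD 0
  let mark := if first_is_m then "M" else "S"
  (first_len + i_sum, first_len + s_sum + i_sum, match_base, mark)

-- ===== PRECONDITION & SPEC =====
-- A calls int() on the length of every 'M', 'S' or 'I' entry and raises ValueError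
-- if it does not parse; Pre_ admits exactly the inputs where every such parse succeeds.
def Pre_softclip_one (cigar_info : List (String × String)) : Prop :=
  ∀ k ∈ cigar_info, (k.2 = "M" ∨ k.2 = "S" ∨ k.2 = "I") → (PySem.Int.ofStr? k.1).isSome
instance (cigar_info : List (String × String)) : Decidable (Pre_softclip_one cigar_info) := by
  unfold Pre_softclip_one; infer_instance
def pvWitness_softclip_one : (List (String × String)) := [("5", "S"), ("10", "M"), ("2", "I"), ("x", "D")]
def Spec_softclip_one (cigar_info : List (String × String)) (out : Int × Int × Int × String) : Prop := out = softclip_one_alt cigar_info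
instance (cigar_info : List (String × String)) (out : Int × Int × Int × String) : Decidable (Spec_softclip_one cigar_info out) := by unfold Spec_softclip_one; infer_instance

-- ===== CLAIM (what is proved, stated in full; the proofs are below) =====
def Claim_equal_softclip_one : Prop := ∀ (cigar_info : List (String × String)), Dom_softclip_one cigar_info → Pre_softclip_one cigar_info → Spec_softclip_one cigar_info (softclip_one cigar_info)

-- ===== LEMMAS AND PROOFS =====

def pvSum (op : String) (l : List (String × String)) : Int :=
  ((l.filter (fun k => k.2 == op)).map (fun k => pvToI k.1)).sum

def pvMLens (l : List (String × String)) : List Int :=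
  (l.filter (fun k => k.2 == "M")).map (fun k => pvToI k.1)

-- after the first iteration the counter is ≥ 1, so the count==1 branches are dead:
-- the rest of the loop just accumulates the I/S sums and the last M length
theorem pvLoopTail (rest : List (String × String)) (scs sce mb count : Int) (mark : String)
    (h : 1 ≤ count) :
    rest.foldl pvStepA (scs, sce, mb, count, mark) =
      (scs + pvSum "I" rest, sce + pvSum "S" rest + pvSum "I" rest,
       (pvMLens rest).getLast?.getD mb, count + rest.length, mark) := by
  induction rest generalizing scs sce mb count with
  | nil => simp [pvSum, pvMLens]
  | cons k rest ih =>
    have h1 : decide (count + 1 > 1) = true := by simp; omega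
    have h2 : (count + 1 == (1 : Int)) = false := by simp; omega
    simp only [List.foldl_cons, pvStepA, h1, h2, Bool.and_true, Bool.and_false, if_false,
      Bool.false_eq_true]
    rw [ih _ _ _ _ (by omega)]
    by_cases hM : k.2 = "M"
    · have hS : k.2 ≠ "S" := by simp [hM]
      have hI : k.2 ≠ "I" := by simp [hM]
      simp [pvSum, pvMLens, hM, List.getLast?_cons]
      omega
    · by_cases hS : k.2 = "S"
      · have hI : k.2 ≠ "I" := by simp [hS]
        simp [pvSum, pvMLens, hS]
        omega
      · by_cases hI : k.2 = "I"
        · simp [pvSum, pvMLens, hI]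
          omega
        · simp [pvSum, pvMLens, hM, hS, hI]
          omega

-- ===== VERDICT (by name: the statement is the Claim_ definition above) =====
theorem softclip_one_spec : Claim_equal_softclip_one := by
  intro ci _ _
  unfold Spec_softclip_one softclip_one softclip_one_alt
  cases ci with
  | nil => simp
  | cons k rest =>
    by_cases hM : k.2 = "M"
    · have hS : k.2 ≠ "S" := by simp [hM]
      have hI : k.2 ≠ "I" := by simp [hM]
      simp only [List.foldl_cons, pvStepA, hM]
      rw [pvLoopTail _ _ _ _ _ _ (by norm_num)]
      simp [pvSum, pvMLens, hM, List.getLast?_cons]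
    · by_cases hS : k.2 = "S"
      · have hI : k.2 ≠ "I" := by simp [hS]
        simp only [List.foldl_cons, pvStepA]
        rw [pvLoopTail _ _ _ _ _ _ (by norm_num)]
        simp [pvSum, pvMLens, hS, hI]
      · by_cases hI : k.2 = "I"
        · simp only [List.foldl_cons, pvStepA]
          rw [pvLoopTail _ _ _ _ _ _ (by norm_num)]
          simp [pvSum, pvMLens, hS, hI]
          omega
        · simp only [List.foldl_cons, pvStepA]
          rw [pvLoopTail _ _ _ _ _ _ (by norm_num)]
          simp [pvSum, pvMLens, hM, hS, hI]
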